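-- pv_equiv track=rewrite | github.com/Karnikasri/Soil_Heath_Status_-_Remediation_System | app.py | extract_nutrient_predictions
-- ===== SOURCE A (Python) =====
-- from typing import Dict, List, Any
-- from typing import Dict, List, Any, Optional
--
-- def extract_nutrient_predictions(response_text: str) -> Dict[str, str]:
--     """Extract nutrient predictions from response"""
--
--     predictions = {}
--
--     # Look for nutrient-specific predictions
--     nutrients = ['nitrogen', 'phosphorus', 'potassium']
--
--     for nutrient in nutrients:
--         if nutrient in response_text.lower():
--             # Find text around nutrient mentions
--             lines = response_text.lower().split('\n')
--             for line in lines: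
--                 if nutrient in line and any(keyword in line for keyword in ['change', 'increase', 'decrease', 'loss', 'gain']):
--                     predictions[nutrient] = line.strip()
--                     break
--
--     return predictions
-- ===== SOURCE B (Python) =====
-- def extract_nutrient_predictions(response_text: str):
--     """Extract nutrient predictions from response: lowercase and split once, one pass over lines."""
--     keywords = ('change', 'increase', 'decrease', 'loss', 'gain')
--     nit = pho = pot = None
--     for line in response_text.lower().split('\n'):
--         if not any(k in line for k in keywords):
--             continue
--         if nit is None and 'nitrogen' in line:
--             nit = line.strip()
--         if pho is None and 'phosphorus' in line:
--             pho = line.strip()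
--         if pot is None and 'potassium' in line:
--             pot = line.strip()
--     predictions = {}
--     if nit is not None:
--         predictions['nitrogen'] = nit
--     if pho is not None:
--         predictions['phosphorus'] = pho
--     if pot is not None:
--         predictions['potassium'] = pot
--     return predictions
-- ===== Notes on version B (the rewrite author's own statement) =====
-- stated objective: alternative
-- what changed: A scans the text and re-splits the lowered text once per nutrient (nested per-nutrient line scans with an outer substring guard); B lowercases and splits once and makes a single pass over the lines, recording the first matching line for each still-unfound nutrient, then emits the results in nutrient order.
import Mathlib
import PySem

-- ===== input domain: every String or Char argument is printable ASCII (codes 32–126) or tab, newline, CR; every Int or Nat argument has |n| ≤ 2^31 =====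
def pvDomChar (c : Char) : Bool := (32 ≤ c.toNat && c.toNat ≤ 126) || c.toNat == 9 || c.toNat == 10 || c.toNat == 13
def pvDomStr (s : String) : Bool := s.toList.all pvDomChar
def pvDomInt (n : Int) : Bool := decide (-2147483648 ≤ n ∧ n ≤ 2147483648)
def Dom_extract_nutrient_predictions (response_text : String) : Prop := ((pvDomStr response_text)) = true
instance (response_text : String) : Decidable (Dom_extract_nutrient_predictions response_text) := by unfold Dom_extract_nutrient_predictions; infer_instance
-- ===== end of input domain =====

-- B re-implements A's per-nutrient scans as one lowercase+split and a single pass over the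
-- lines, recording the first matching line per nutrient; same return value (alternative, not faster).

-- ===== PORT A =====
-- literal port of A: for each nutrient, outer substring guard, then re-split the lowered text
-- and take the first line matching the condition ('for line in lines: … break' = List.find?)
def extract_nutrient_predictions (response_text : String) : List (String × String) :=
  let predictions : PySem.Dict String String := PySem.Dict.empty
  let nutrients := ["nitrogen", "phosphorus", "potassium"]
  (nutrients.foldl (fun predictions nutrient =>
      if PySem.Str.isIn nutrient (PySem.Str.lower response_text) then
        let lines := (PySem.Str.split? (PySem.Str.lower response_text) "\n").getD []
        match lines.find? (fun line =>
            PySem.Str.isIn nutrient line &&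
            (["change", "increase", "decrease", "loss", "gain"].any
              (fun keyword => PySem.Str.isIn keyword line))) with
        | some line => predictions.insert nutrient (PySem.Str.strip line)
        | none => predictions
      else predictions)
    predictions).items

-- ===== PORT B =====
-- port of B: lowercase/split once; one fold over the lines carrying the three not-yet-found
-- slots (nit, pho, pot); then the result dict is assembled in nutrient order
def extract_nutrient_predictions_alt (response_text : String) : List (String × String) :=
  let keywords := ["change", "increase", "decrease", "loss", "gain"]
  let st :=
    ((PySem.Str.split? (PySem.Str.lower response_text) "\n").getD []).foldl
      (fun (st : Option String × Option String × Option String) line =>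
        if !(keywords.any (fun k => PySem.Str.isIn k line)) then st
        else
          let nit := if st.1.isNone && PySem.Str.isIn "nitrogen" line then
            some (PySem.Str.strip line) else st.1
          let pho := if st.2.1.isNone && PySem.Str.isIn "phosphorus" line then
            some (PySem.Str.strip line) else st.2.1
          let pot := if st.2.2.isNone && PySem.Str.isIn "potassium" line then
            some (PySem.Str.strip line) else st.2.2
          (nit, pho, pot))
      (none, none, none)
  let predictions : PySem.Dict String String := PySem.Dict.empty
  let predictions := match st.1 with
    | some v => predictions.insert "nitrogen" v
    | none => predictions
  let predictions := match st.2.1 with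
    | some v => predictions.insert "phosphorus" v
    | none => predictions
  let predictions := match st.2.2 with
    | some v => predictions.insert "potassium" v
    | none => predictions
  predictions.items

-- ===== PRECONDITION & SPEC =====
def Spec_extract_nutrient_predictions (response_text : String) (out : List (String × String)) : Prop := out = extract_nutrient_predictions_alt response_text
instance (response_text : String) (out : List (String × String)) : Decidable (Spec_extract_nutrient_predictions response_text out) := by unfold Spec_extract_nutrient_predictions; infer_instance

-- ===== CLAIM (what is proved, stated in full; the proofs are below) =====
def Claim_equal_extract_nutrient_predictions : Prop := ∀ (response_text : String), Dom_extract_nutrient_predictions response_text → Spec_extract_nutrient_predictions response_text (extract_nutrient_predictions response_text)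

-- ===== LEMMAS AND PROOFS =====

-- every piece produced by splitOn.go is an already-accumulated piece or an infix of cur.reverse ++ l
theorem pv_go_mem_infix (sep : List Char) (fuel : Nat) (l cur : List Char)
    (acc : List (List Char)) (x : List Char)
    (hx : x ∈ PySem.Chars.splitOn.go sep fuel l cur acc) :
    x ∈ acc ∨ x <:+: (cur.reverse ++ l) := by
  induction fuel, l, cur, acc using PySem.Chars.splitOn.go.induct sep with
  | case1 l cur acc =>
    simp only [PySem.Chars.splitOn.go, List.mem_reverse, List.mem_cons] at hx
    rcases hx with h | h
    · exact Or.inr (h ▸ List.infix_rfl)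
    · exact Or.inl h
  | case2 t cur acc ht =>
    match t, ht with
    | Nat.succ t, _ =>
      simp only [PySem.Chars.splitOn.go, List.mem_reverse, List.mem_cons] at hx
      rcases hx with h | h
      · exact Or.inr (h ▸ (by simp))
      · exact Or.inl h
  | case3 fuel c rest cur acc hpre ih =>
    rw [PySem.Chars.splitOn.go, if_pos hpre] at hx
    rcases ih hx with h | h
    · rcases List.mem_cons.mp h with h | h
      · exact Or.inr (h ▸ (List.prefix_append _ _).isInfix)
      · exact Or.inl h
    · refine Or.inr (h.trans ?_)
      simp only [List.reverse_nil, List.nil_append]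
      exact (List.drop_suffix sep.length (c :: rest)).isInfix.trans (List.suffix_append cur.reverse (c :: rest)).isInfix
  | case4 fuel c rest cur acc hpre ih =>
    rw [PySem.Chars.splitOn.go, if_neg hpre] at hx
    rcases ih hx with h | h
    · exact Or.inl h
    · refine Or.inr ?_
      have : (c :: cur).reverse ++ rest = cur.reverse ++ (c :: rest) := by simp
      exact this ▸ h

theorem pv_mem_splitOn_infix (s sep x : List Char)
    (hx : x ∈ PySem.Chars.splitOn s sep) : x <:+: s := by
  have := pv_go_mem_infix sep (s.length + 1) s [] [] x hx
  simpa using this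

-- a line of the lowered text contains the nutrient only if the whole lowered text does
theorem pv_line_isIn (lo line sub : String)
    (hline : line ∈ (PySem.Str.split? lo "\n").getD [])
    (hsub : PySem.Str.isIn sub line = true) :
    PySem.Str.isIn sub lo = true := by
  have hsplit : (PySem.Str.split? lo "\n").getD []
      = (PySem.Chars.splitOn lo.toList "\n".toList).map String.ofList := by
    simp [PySem.Str.split?, PySem.Chars.split?]
  rw [hsplit, List.mem_map] at hline
  obtain ⟨cs, hcs, rfl⟩ := hline
  have h1 : sub.toList <:+: cs := by
    have := (PySem.Str.isIn_iff_infix _ _).mp hsub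
    simpa [String.toList_ofList] using this
  exact (PySem.Str.isIn_iff_infix _ _).mpr
    (h1.trans (pv_mem_splitOn_infix lo.toList "\n".toList cs hcs))

-- the one-slot fold keeps an already-found value
theorem pv_fold_some (q : String → Bool) (l : List String) (v : String) :
    l.foldl (fun o line => if o.isNone && q line then some (PySem.Str.strip line) else o)
      (some v) = some v := by
  induction l with
  | nil => rfl
  | cons a t ih => simpa using ih

-- the one-slot fold computes the stripped first matching line
theorem pv_fold_find (q : String → Bool) (l : List String) :
    l.foldl (fun o line => if o.isNone && q line then some (PySem.Str.strip line) else o)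
      none = (l.find? q).map PySem.Str.strip := by
  induction l with
  | nil => rfl
  | cons a t ih =>
    rw [List.foldl_cons, List.find?_cons]
    by_cases hq : q a = true
    · rw [show (if ((none : Option String).isNone && q a) = true then some (PySem.Str.strip a) else none) = some (PySem.Str.strip a) from by simp [hq]]
      rw [pv_fold_some, hq]
      rfl
    · rw [show (if ((none : Option String).isNone && q a) = true then some (PySem.Str.strip a) else none) = none from by simp [hq]]
      rw [ih]
      simp [hq]

-- B's fold step, per component
def pvStep (n : String) (o : Option String) (line : String) : Option String :=
  if o.isNone && (PySem.Str.isIn n line &&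
      (["change", "increase", "decrease", "loss", "gain"].any
        (fun k => PySem.Str.isIn k line))) then some (PySem.Str.strip line) else o

def pvStep2 (s2 : Option String × Option String) (line : String) :
    Option String × Option String :=
  (pvStep "phosphorus" s2.1 line, pvStep "potassium" s2.2 line)

theorem pv_fold_pvStep (n : String) (l : List String) :
    l.foldl (pvStep n) none
      = (l.find? (fun line => PySem.Str.isIn n line &&
          (["change", "increase", "decrease", "loss", "gain"].any
            (fun k => PySem.Str.isIn k line)))).map PySem.Str.strip :=
  pv_fold_find _ l

-- B's triple fold, component-wise
theorem pv_alt_fold (l : List String) :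
    (l.foldl
      (fun (st : Option String × Option String × Option String) line =>
        if !(["change", "increase", "decrease", "loss", "gain"].any
              (fun k => PySem.Str.isIn k line)) then st
        else
          let nit := if st.1.isNone && PySem.Str.isIn "nitrogen" line then
            some (PySem.Str.strip line) else st.1
          let pho := if st.2.1.isNone && PySem.Str.isIn "phosphorus" line then
            some (PySem.Str.strip line) else st.2.1
          let pot := if st.2.2.isNone && PySem.Str.isIn "potassium" line then
            some (PySem.Str.strip line) else st.2.2
          (nit, pho, pot))
      (none, none, none))
    = (l.foldl (pvStep "nitrogen") none,
       l.foldl (pvStep "phosphorus") none,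
       l.foldl (pvStep "potassium") none) := by
  have hfun : (fun (st : Option String × Option String × Option String) line =>
        if !(["change", "increase", "decrease", "loss", "gain"].any
              (fun k => PySem.Str.isIn k line)) then st
        else
          let nit := if st.1.isNone && PySem.Str.isIn "nitrogen" line then
            some (PySem.Str.strip line) else st.1
          let pho := if st.2.1.isNone && PySem.Str.isIn "phosphorus" line then
            some (PySem.Str.strip line) else st.2.1
          let pot := if st.2.2.isNone && PySem.Str.isIn "potassium" line then
            some (PySem.Str.strip line) else st.2.2
          (nit, pho, pot))
      = (fun (st : Option String × Option String × Option String) line =>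
          (pvStep "nitrogen" st.1 line, pvStep2 st.2 line)) := by
    funext st line
    by_cases hk : (["change", "increase", "decrease", "loss", "gain"].any
        (fun k => PySem.Str.isIn k line)) = true
    · simp only [pvStep, pvStep2, hk, Bool.not_true, Bool.and_true]
      simp
    · rw [Bool.not_eq_true] at hk
      simp only [pvStep, pvStep2, hk, Bool.not_false, Bool.and_false, if_true]
      simp
  rw [hfun, PySem.List.foldl_prod_mk (f := pvStep "nitrogen") (g := pvStep2)]
  rw [show pvStep2 = (fun (s2 : Option String × Option String) line =>
      (pvStep "phosphorus" s2.1 line, pvStep "potassium" s2.2 line)) from rfl,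
    PySem.List.foldl_prod_mk (f := pvStep "phosphorus") (g := pvStep "potassium")]

-- a successful find? implies A's outer substring guard
theorem pv_guard (lo n l : String)
    (h : (((PySem.Str.split? lo "\n").getD []).find? (fun line =>
        PySem.Str.isIn n line &&
        (["change", "increase", "decrease", "loss", "gain"].any
          (fun k => PySem.Str.isIn k line)))) = some l) :
    PySem.Str.isIn n lo = true := by
  have hp := List.find?_some h
  have hm := List.mem_of_find?_eq_some h
  exact pv_line_isIn lo l n hm ((Bool.and_eq_true _ _).mp hp).1

-- ===== VERDICT (by name: the statement is the Claim_ definition above) =====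
theorem extract_nutrient_predictions_spec : Claim_equal_extract_nutrient_predictions := by
  intro response_text _
  unfold Spec_extract_nutrient_predictions
  simp only [extract_nutrient_predictions, extract_nutrient_predictions_alt]
  rw [pv_alt_fold, pv_fold_pvStep, pv_fold_pvStep, pv_fold_pvStep]
  rcases h1 : ((PySem.Str.split? (PySem.Str.lower response_text) "\n").getD []).find?
      (fun line => PySem.Str.isIn "nitrogen" line &&
      (["change", "increase", "decrease", "loss", "gain"].any
        (fun k => PySem.Str.isIn k line))) with _ | l1 <;>
  rcases h2 : ((PySem.Str.split? (PySem.Str.lower response_text) "\n").getD []).find?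
      (fun line => PySem.Str.isIn "phosphorus" line &&
      (["change", "increase", "decrease", "loss", "gain"].any
        (fun k => PySem.Str.isIn k line))) with _ | l2 <;>
  rcases h3 : ((PySem.Str.split? (PySem.Str.lower response_text) "\n").getD []).find?
      (fun line => PySem.Str.isIn "potassium" line &&
      (["change", "increase", "decrease", "loss", "gain"].any
        (fun k => PySem.Str.isIn k line))) with _ | l3 <;>
  simp only [List.foldl, h1, h2, h3, Option.map_some, Option.map_none] <;>
  (try simp only [pv_guard _ _ _ h1]) <;>
  (try simp only [pv_guard _ _ _ h2]) <;>
  (try simp only [pv_guard _ _ _ h3]) <;>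
  simp [ite_self]
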